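-- pv_equiv track=rewrite | github.com/LegendaryAKx3/launchpilot | apps/api/app/agents/lead_pipeline_agent.py | _clean_urls
-- ===== SOURCE A (Python) =====
-- def _clean_urls(raw: object) -> list[str]:
--     if not isinstance(raw, list):
--         return []
--     out: list[str] = []
--     for item in raw:
--         url = str(item or "").strip()
--         if not url.startswith("http://") and not url.startswith("https://"):
--             continue
--         out.append(url)
--     # Keep order, dedupe.
--     deduped = list(dict.fromkeys(out))
--     return deduped[:5]
-- ===== SOURCE B (Python) =====
-- def _clean_urls(raw: object) -> list[str]:
--     if not isinstance(raw, list):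
--         return []
--     seen: set[str] = set()
--     out: list[str] = []
--     for item in raw:
--         url = str(item or "").strip()
--         if not (url.startswith("http://") or url.startswith("https://")):
--             continue
--         if url in seen:
--             continue
--         seen.add(url)
--         out.append(url)
--         if len(out) == 5:
--             break
--     return out
-- ===== Notes on version B (the rewrite author's own statement) =====
-- stated objective: simpler
-- what changed: Replaces the build-full-list / dict.fromkeys-dedupe / slice pipeline with one early-terminating pass that maintains a seen set and stops as soon as 5 URLs are collected.
import Mathlib
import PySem

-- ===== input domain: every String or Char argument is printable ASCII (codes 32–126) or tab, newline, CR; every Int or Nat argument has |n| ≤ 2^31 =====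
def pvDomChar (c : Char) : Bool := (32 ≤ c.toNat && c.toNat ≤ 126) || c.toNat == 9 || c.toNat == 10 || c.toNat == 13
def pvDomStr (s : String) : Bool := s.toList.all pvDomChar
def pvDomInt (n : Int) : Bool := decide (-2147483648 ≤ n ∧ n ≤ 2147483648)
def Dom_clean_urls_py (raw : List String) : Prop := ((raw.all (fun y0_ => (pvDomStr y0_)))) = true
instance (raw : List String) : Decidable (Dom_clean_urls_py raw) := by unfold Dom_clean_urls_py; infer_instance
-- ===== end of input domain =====

-- B replaces A's build-then-dedupe-then-slice pipeline by one early-terminating pass with a seen set (simpler).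
-- ===== PORT A =====
-- raw is typed List String, so `isinstance(raw, list)` is always true and `str(item or "")` is `item` itself
-- (a falsy string is "" and str is the identity on strings); both are transliterated accordingly.
def clean_urls_py (raw : List String) : List String :=
  let out := raw.foldl (fun out item =>
    let url := PySem.Str.strip item
    if !(PySem.Str.startswith url "http://") && !(PySem.Str.startswith url "https://") then out
    else out ++ [url]) []
  let deduped := PySem.List.dedup out   -- list(dict.fromkeys(out))
  PySem.List.slice deduped none (some 5)

-- ===== PORT B =====
def clean_urls_py_alt_go : List String → PySem.Set String → List String → List String
  | [], _, out => out
  | item :: rest, seen, out =>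
    let url := PySem.Str.strip item
    if !(PySem.Str.startswith url "http://" || PySem.Str.startswith url "https://") then
      clean_urls_py_alt_go rest seen out
    else if PySem.Set.contains seen url then
      clean_urls_py_alt_go rest seen out
    else
      let out' := out ++ [url]
      if out'.length == 5 then out'
      else clean_urls_py_alt_go rest (PySem.Set.add seen url) out'

def clean_urls_py_alt (raw : List String) : List String :=
  clean_urls_py_alt_go raw PySem.Set.empty []

-- ===== PRECONDITION & SPEC =====
def Spec_clean_urls_py (raw : List String) (out : List String) : Prop := out = clean_urls_py_alt raw
instance (raw : List String) (out : List String) : Decidable (Spec_clean_urls_py raw out) := by unfold Spec_clean_urls_py; infer_instance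

-- ===== CLAIM (what is proved, stated in full; the proofs are below) =====
def Claim_equal_clean_urls_py : Prop := ∀ (raw : List String), Dom_clean_urls_py raw → Spec_clean_urls_py raw (clean_urls_py raw)

-- ===== LEMMAS AND PROOFS =====

/-- The valid-URL extraction both programs share. -/
def pvG (item : String) : Option String :=
  let url := PySem.Str.strip item
  if PySem.Str.startswith url "http://" || PySem.Str.startswith url "https://" then some url else none

/-- Keep-first dedupe relative to an already-seen list. -/
def pvDedupFrom (seen : List String) : List String → List String
  | [] => []
  | x :: xs => if x ∈ seen then pvDedupFrom seen xs else x :: pvDedupFrom (seen ++ [x]) xs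

theorem pvFoldA (raw : List String) (init : List String) :
    raw.foldl (fun out item =>
      let url := PySem.Str.strip item
      if !(PySem.Str.startswith url "http://") && !(PySem.Str.startswith url "https://") then out
      else out ++ [url]) init = init ++ raw.filterMap pvG := by
  induction raw generalizing init with
  | nil => simp
  | cons x xs ih =>
    rw [List.foldl_cons, List.filterMap_cons]
    have hb : (!(PySem.Str.startswith (PySem.Str.strip x) "http://") &&
        !(PySem.Str.startswith (PySem.Str.strip x) "https://")) =
        !(PySem.Str.startswith (PySem.Str.strip x) "http://" ||
          PySem.Str.startswith (PySem.Str.strip x) "https://") := (Bool.not_or _ _).symm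
    cases hc : (PySem.Str.startswith (PySem.Str.strip x) "http://" ||
        PySem.Str.startswith (PySem.Str.strip x) "https://") with
    | true => simp only [pvG, hb, hc, Bool.not_true, Bool.false_eq_true, if_false, if_true, ih]; simp
    | false => simp only [pvG, hb, hc, Bool.not_false, Bool.false_eq_true, if_true, if_false, ih]

theorem pvFoldAdd (xs : List String) (seen : List String) :
    xs.foldl PySem.Set.add seen = seen ++ pvDedupFrom seen xs := by
  induction xs generalizing seen with
  | nil => simp [pvDedupFrom]
  | cons x l ih =>
    rw [List.foldl_cons]
    by_cases h : x ∈ seen <;>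
      simp [PySem.Set.add, PySem.Set.contains, pvDedupFrom, h, ih]

theorem pvOfList_eq (xs : List String) : PySem.Set.ofList xs = pvDedupFrom [] xs := by
  rw [PySem.Set.ofList_eq_foldl]
  simpa using pvFoldAdd xs []

theorem pvGo (l : List String) (seen : List String) (out : List String)
    (h : out.length < 5) :
    clean_urls_py_alt_go l seen out =
      out ++ (pvDedupFrom seen (l.filterMap pvG)).take (5 - out.length) := by
  induction l generalizing seen out with
  | nil => simp [clean_urls_py_alt_go, pvDedupFrom]
  | cons x xs ih =>
    rw [clean_urls_py_alt_go, List.filterMap_cons]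
    cases hc : (PySem.Str.startswith (PySem.Str.strip x) "http://" ||
        PySem.Str.startswith (PySem.Str.strip x) "https://") with
    | false =>
      simp only [pvG, hc, Bool.not_false, Bool.false_eq_true, if_true, if_false]
      exact ih seen out h
    | true =>
      simp only [pvG, hc, Bool.not_true, Bool.false_eq_true, if_false, if_true]
      rw [pvDedupFrom]
      by_cases hs : PySem.Str.strip x ∈ seen
      · have : PySem.Set.contains seen (PySem.Str.strip x) = true := by
          simp [PySem.Set.contains, hs]
        simp only [this, if_true, if_pos hs]
        exact ih seen out h
      · have hcon : PySem.Set.contains seen (PySem.Str.strip x) = false := by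
          simp [PySem.Set.contains, hs]
        simp only [hcon, Bool.false_eq_true, if_false, if_neg hs]
        have hadd : PySem.Set.add seen (PySem.Str.strip x) = seen ++ [PySem.Str.strip x] := by
          simp [PySem.Set.add, PySem.Set.contains, hs]
        by_cases h5 : (out ++ [PySem.Str.strip x]).length = 5
        · have h1 : ((out ++ [PySem.Str.strip x]).length == 5) = true := by simp [h5]
          have h2 : 5 - out.length = 1 := by simp at h5; omega
          simp only [h1, if_true, h2, List.take_succ_cons, List.take_zero]
        · have h1 : ((out ++ [PySem.Str.strip x]).length == 5) = false := by simp_all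
          have hlt : (out ++ [PySem.Str.strip x]).length < 5 := by simp at h5 ⊢; omega
          simp only [h1, Bool.false_eq_true, if_false]
          rw [hadd, ih _ _ hlt]
          have h2 : 5 - out.length = (5 - (out ++ [PySem.Str.strip x]).length) + 1 := by
            simp at h5 ⊢; omega
          rw [h2, List.take_succ_cons]
          simp [pvG]

-- ===== VERDICT (by name: the statement is the Claim_ definition above) =====
theorem clean_urls_py_spec : Claim_equal_clean_urls_py := by
  intro raw _
  unfold Spec_clean_urls_py clean_urls_py clean_urls_py_alt
  rw [pvFoldA raw [], pvGo raw PySem.Set.empty [] (by simp)]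
  rw [PySem.List.slice_to _ (by norm_num)]
  simp [PySem.List.dedup, pvOfList_eq, PySem.Set.empty]
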